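-- pv_equiv track=rewrite | github.com/fabriziocosta/EDeN | eden/graphicalizer/RNA/OLD/draw.py | get_subgraph_text
-- ===== SOURCE A (Python) =====
-- def get_subgraph_text(key,nests,done):
-- 	''' belongs so nx_draw_dot'''
-- 	if key in done:
-- 		return ''
-- 	done[key]=''
-- 	if key not in nests:
-- 		return "%s;\n" % key
-- 	childs= nests[key]
-- 	text='\nsubgraph cluster_'+str(key)+"{\n"+str(key)+";\n"
--
-- 	f=lambda x: 0 if x in nests else 1
-- 	childs=sorted(childs,key=f)
-- 	for child in childs:
-- 			text+= get_subgraph_text(child,nests,done)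
-- 	text+='}\n'
-- 	return text
-- ===== SOURCE B (Python) =====
-- def get_subgraph_text(key, nests, done):
--     ''' belongs to nx_draw_dot (iterative version: explicit stack instead of recursion)'''
--     parts = []
--     stack = [('open', key)]
--     while stack:
--         tag, k = stack.pop()
--         if tag == 'close':
--             parts.append('}\n')
--             continue
--         if k in done:
--             continue
--         done[k] = ''
--         if k not in nests:
--             parts.append("%s;\n" % k)
--             continue
--         parts.append('\nsubgraph cluster_' + str(k) + "{\n" + str(k) + ";\n")
--         stack.append(('close', k))
--         childs = sorted(nests[k], key=lambda x: 0 if x in nests else 1)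
--         for child in reversed(childs):
--             stack.append(('open', child))
--     return ''.join(parts)
-- ===== Notes on version B (the rewrite author's own statement) =====
-- stated objective: alternative
-- what changed: Replaces A's recursive DFS with an iterative while-loop over an explicit stack of tagged open/close entries, collecting the emitted text fragments in a list that is joined once at the end.
import Mathlib
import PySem

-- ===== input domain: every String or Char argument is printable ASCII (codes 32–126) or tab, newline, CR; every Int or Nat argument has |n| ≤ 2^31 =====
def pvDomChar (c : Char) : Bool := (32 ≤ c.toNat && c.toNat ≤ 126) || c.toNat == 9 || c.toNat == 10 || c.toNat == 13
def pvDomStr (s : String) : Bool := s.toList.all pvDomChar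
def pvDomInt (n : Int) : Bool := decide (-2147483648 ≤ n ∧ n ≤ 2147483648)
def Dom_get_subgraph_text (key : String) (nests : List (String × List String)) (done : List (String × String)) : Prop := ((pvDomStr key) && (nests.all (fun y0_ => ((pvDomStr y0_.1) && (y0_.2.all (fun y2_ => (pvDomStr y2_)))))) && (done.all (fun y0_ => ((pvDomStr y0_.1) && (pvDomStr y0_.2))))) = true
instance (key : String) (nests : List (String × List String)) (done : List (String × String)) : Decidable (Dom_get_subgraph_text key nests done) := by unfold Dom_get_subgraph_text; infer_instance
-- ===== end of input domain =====

-- B replaces A's recursive DFS by an iterative loop over an explicit stack of open/close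
-- entries that collects text fragments and joins them at the end (objective: alternative).
-- Both Pythons mutate `done` identically; the equivalence proved here is about the RETURN value.

-- ===== PORT A =====
-- A's recursion is guarded by a fuel argument (recursion-depth guard only; the lemmas
-- pvGoA_main/pvU_le_size below show fuel `size+1` is never exhausted on any input).
mutual
def pvGoA (nests : PySem.Dict String (List String)) : Nat → String → PySem.Dict String String → String × PySem.Dict String String
  | 0, _, done => ("", done)
  | Nat.succ n, key, done =>
    if done.contains key then ("", done)
    else
      let done1 := done.insert key ""
      match nests.get? key with
      | none => (key ++ ";\n", done1)
      | some childs =>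
        let sc := PySem.List.sorted childs (fun x => if nests.contains x then (0 : Int) else 1) false
        let r := pvGoListA nests n sc ("\nsubgraph cluster_" ++ key ++ "{\n" ++ key ++ ";\n") done1
        (r.1 ++ "}\n", r.2)
  termination_by n _ _ => (n, 0)

-- the `for child in childs: text += get_subgraph_text(...)` loop of A
def pvGoListA (nests : PySem.Dict String (List String)) : Nat → List String → String → PySem.Dict String String → String × PySem.Dict String String
  | _, [], text, done => (text, done)
  | n, c :: cs, text, done =>
    let s := pvGoA nests n c done
    pvGoListA nests n cs (text ++ s.1) s.2
  termination_by n cs _ _ => (n, cs.length + 1)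
end

def get_subgraph_text (key : String) (nests : List (String × List String)) (done : List (String × String)) : String :=
  (pvGoA (PySem.Dict.mk nests) ((PySem.Dict.mk nests).size + 1) key (PySem.Dict.mk done)).1

-- ===== PORT B =====
-- number of (distinct) nest keys not yet marked done: the loop variant of B's while-loop
def pvU (nests : PySem.Dict String (List String)) (done : PySem.Dict String String) : Nat :=
  ((nests.keys.dedup).filter (fun k => !done.contains k)).length

lemma pvU_insert_leaf (nests : PySem.Dict String (List String)) (done : PySem.Dict String String)
    (k : String) (v : String) (h : nests.get? k = none) :
    pvU nests (done.insert k v) = pvU nests done := by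
  unfold pvU
  congr 1
  apply List.filter_congr
  intro x hx
  have hk : nests.contains k = false := (PySem.Dict.get?_eq_none_iff_contains nests k).1 h
  have hxk : x ≠ k := by
    intro e; subst e
    exact absurd ((PySem.Dict.contains_iff_mem_keys nests x).2 (List.mem_dedup.1 hx)) (by simp [hk])
  simp [PySem.Dict.contains_insert, hxk]

lemma pvU_insert_nest (nests : PySem.Dict String (List String)) (done : PySem.Dict String String)
    (k : String) (v : String) (cs : List String) (h : nests.get? k = some cs)
    (hd : done.contains k = false) :
    pvU nests (done.insert k v) < pvU nests done := by
  unfold pvU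
  have hk : k ∈ nests.keys.dedup := by
    apply List.mem_dedup.2
    apply (PySem.Dict.contains_iff_mem_keys nests k).1
    rcases hcon : nests.contains k with _ | _
    · exact absurd h (by simp [(PySem.Dict.get?_eq_none_iff_contains nests k).2 hcon])
    · rfl
  obtain ⟨s, t, hst⟩ := List.append_of_mem hk
  rw [hst]
  have himp : ∀ x, (!(done.insert k v).contains x) = true → (!done.contains x) = true := by
    intro x hx
    simp only [PySem.Dict.contains_insert, Bool.not_eq_eq_eq_not, Bool.not_true, Bool.or_eq_false_iff] at hx
    simp [hx.2]
  have h1 := List.countP_mono_left (l := s) (fun x _ => himp x)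
  have h2 := List.countP_mono_left (l := t) (fun x _ => himp x)
  simp [← List.countP_eq_length_filter, hd, PySem.Dict.contains_insert_self]
  omega

def pvRunB (nests : PySem.Dict String (List String)) : List (Bool × String) → List String → PySem.Dict String String → List String × PySem.Dict String String
  -- the stack is kept head-as-top: Python's pop() reads the head, pushing the reversed
  -- sorted children after the close sentinel puts `sc.map open ++ close :: rest` on the stack
  | [], parts, done => (parts, done)
  | (false, _) :: rest, parts, done => pvRunB nests rest (parts ++ ["}\n"]) done
  | (true, k) :: rest, parts, done =>
    if done.contains k then pvRunB nests rest parts done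
    else
      let done1 := done.insert k ""
      match h : nests.get? k with
      | none => pvRunB nests rest (parts ++ [k ++ ";\n"]) done1
      | some childs =>
        let sc := PySem.List.sorted childs (fun x => if nests.contains x then (0 : Int) else 1) false
        pvRunB nests (sc.map (fun c => (true, c)) ++ (false, k) :: rest)
          (parts ++ ["\nsubgraph cluster_" ++ k ++ "{\n" ++ k ++ ";\n"]) done1
  termination_by stack _ done => (pvU nests done, stack.length)
  decreasing_by
  · exact Prod.Lex.right _ (by simp)
  · exact Prod.Lex.right _ (by simp)
  · rw [pvU_insert_leaf nests done k "" h]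
    exact Prod.Lex.right _ (by simp)
  · exact Prod.Lex.left _ _ (pvU_insert_nest nests done k "" childs h (by simp_all))

def get_subgraph_text_alt (key : String) (nests : List (String × List String)) (done : List (String × String)) : String :=
  PySem.Str.join "" (pvRunB (PySem.Dict.mk nests) [(true, key)] [] (PySem.Dict.mk done)).1

-- ===== PRECONDITION & SPEC =====
def Spec_get_subgraph_text (key : String) (nests : List (String × List String)) (done : List (String × String)) (out : String) : Prop := out = get_subgraph_text_alt key nests done
instance (key : String) (nests : List (String × List String)) (done : List (String × String)) (out : String) : Decidable (Spec_get_subgraph_text key nests done out) := by unfold Spec_get_subgraph_text; infer_instance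

-- ===== CLAIM (what is proved, stated in full; the proofs are below) =====
def Claim_equal_get_subgraph_text : Prop := ∀ (key : String) (nests : List (String × List String)) (done : List (String × String)), Dom_get_subgraph_text key nests done → Spec_get_subgraph_text key nests done (get_subgraph_text key nests done)

-- ===== LEMMAS AND PROOFS =====

lemma pv_join_nil : PySem.Str.join "" [] = "" := by
  simp [PySem.Str.join, PySem.Chars.join_nil]

lemma pv_join_cons (p : String) (ps : List String) :
    PySem.Str.join "" (p :: ps) = p ++ PySem.Str.join "" ps := by
  cases ps with
  | nil =>
    simp [PySem.Str.join, PySem.Chars.join_singleton, PySem.Chars.join_nil,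
      String.ofList_toList]
  | cons q qs =>
    simp [PySem.Str.join, PySem.Chars.join_cons_cons, String.ofList_append,
      String.ofList_toList]

lemma pv_join_append (F G : List String) :
    PySem.Str.join "" (F ++ G) = PySem.Str.join "" F ++ PySem.Str.join "" G := by
  induction F with
  | nil => simp [pv_join_nil]
  | cons p ps ih => simp [pv_join_cons, ih, String.append_assoc]

-- A only adds keys to `done`
lemma pvGoA_contains (nests : PySem.Dict String (List String)) :
    ∀ n key done x, done.contains x = true → ((pvGoA nests n key done).2).contains x = true := by
  intro n
  induction n with
  | zero => intro key done x hx; simpa [pvGoA] using hx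
  | succ n ih =>
    have auxL : ∀ cs text d x, d.contains x = true →
        ((pvGoListA nests n cs text d).2).contains x = true := by
      intro cs
      induction cs with
      | nil => intro text d x hd; simpa [pvGoListA] using hd
      | cons c cs' ihc =>
        intro text d x hd
        rw [pvGoListA]
        exact ihc _ _ _ (ih c d x hd)
    intro key done x hx
    by_cases hks : done.contains key = true
    · simpa [pvGoA, hks] using hx
    · cases hget : nests.get? key with
      | none => simp [pvGoA, hks, hget, PySem.Dict.contains_insert, hx]
      | some childs =>
        simp only [pvGoA, hks, hget]
        exact auxL _ _ _ _ (by simp [PySem.Dict.contains_insert, hx])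

lemma pvU_le_of_contains (nests : PySem.Dict String (List String))
    (d d' : PySem.Dict String String)
    (h : ∀ x, d.contains x = true → d'.contains x = true) :
    pvU nests d' ≤ pvU nests d := by
  unfold pvU
  simp only [← List.countP_eq_length_filter]
  apply List.countP_mono_left
  intro x _ hx
  rcases hc : d.contains x with _ | _
  · simp
  · simp [h x hc] at hx

lemma pvU_le_size (nests : PySem.Dict String (List String)) (done : PySem.Dict String String) :
    pvU nests done ≤ nests.size := by
  calc pvU nests done ≤ nests.keys.dedup.length := List.length_filter_le _ _
    _ ≤ nests.keys.length := (List.dedup_sublist _).length_le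
    _ = nests.size := by simp [PySem.Dict.keys, PySem.Dict.size]

-- B's accumulator is only ever appended to
lemma pvRunB_frame (nests : PySem.Dict String (List String)) :
    ∀ stack parts done (p : List String),
      pvRunB nests stack (p ++ parts) done
        = (p ++ (pvRunB nests stack parts done).1, (pvRunB nests stack parts done).2) := by
  intro stack parts done
  induction stack, parts, done using pvRunB.induct nests with
  | case1 parts done => intro p; simp [pvRunB]
  | case2 s rest parts done ih =>
    intro p
    rw [pvRunB, List.append_assoc, ih p]
    conv_rhs => rw [pvRunB]
  | case3 k rest parts done hk ih =>
    intro p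
    rw [pvRunB, if_pos hk, ih p]
    conv_rhs => rw [pvRunB, if_pos hk]
  | case4 k rest parts done hk _d1 hget ih =>
    intro p
    rw [pvRunB, if_neg hk, hget, List.append_assoc]
    conv_rhs => rw [pvRunB, if_neg hk, hget]
    exact ih p
  | case5 k rest parts done hk _d1 childs hget _sc ih =>
    intro p
    rw [pvRunB, if_neg hk, hget]
    conv_rhs => rw [pvRunB, if_neg hk, hget]
    simp only [List.append_assoc]
    exact ih p

lemma pvGoListA_frame (nests : PySem.Dict String (List String)) :
    ∀ n cs (text : String) done,
      pvGoListA nests n cs text done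
        = (text ++ (pvGoListA nests n cs "" done).1, (pvGoListA nests n cs "" done).2) := by
  intro n cs
  induction cs with
  | nil => intro text done; simp [pvGoListA]
  | cons c cs' ih =>
    intro text done
    rw [pvGoListA, ih]
    conv_rhs => rw [pvGoListA, ih]
    simp [String.empty_append, String.append_assoc]

-- the simulation: one `open key` entry on B's stack does exactly what one call of A does
lemma pvGoA_main (nests : PySem.Dict String (List String)) :
    ∀ n key done rest, pvU nests done < n →
      ∃ F, PySem.Str.join "" F = (pvGoA nests n key done).1 ∧
        pvRunB nests ((true, key) :: rest) [] done
          = (F ++ (pvRunB nests rest [] (pvGoA nests n key done).2).1,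
             (pvRunB nests rest [] (pvGoA nests n key done).2).2) := by
  intro n
  induction n with
  | zero => intro key done rest h; omega
  | succ n ih =>
    have ihL : ∀ cs done rest, pvU nests done < n →
        ∃ F, PySem.Str.join "" F = (pvGoListA nests n cs "" done).1 ∧
          pvRunB nests (cs.map (fun c => (true, c)) ++ rest) [] done
            = (F ++ (pvRunB nests rest [] (pvGoListA nests n cs "" done).2).1,
               (pvRunB nests rest [] (pvGoListA nests n cs "" done).2).2) := by
      intro cs
      induction cs with
      | nil =>
        intro done rest h
        refine ⟨[], ?_, by simp [pvGoListA]⟩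
        simp [pv_join_nil, pvGoListA]
      | cons c cs' ihc =>
        intro done rest h
        obtain ⟨F₁, hj₁, hr₁⟩ := ih c done (cs'.map (fun c => (true, c)) ++ rest) h
        have hU2 : pvU nests (pvGoA nests n c done).2 < n :=
          lt_of_le_of_lt
            (pvU_le_of_contains nests done _ (fun x hx => pvGoA_contains nests n c done x hx)) h
        obtain ⟨F₂, hj₂, hr₂⟩ := ihc (pvGoA nests n c done).2 rest hU2
        have hd : (pvGoListA nests n (c :: cs') "" done).2
            = (pvGoListA nests n cs' "" (pvGoA nests n c done).2).2 := by
          rw [pvGoListA, pvGoListA_frame]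
        have ht : (pvGoListA nests n (c :: cs') "" done).1
            = (pvGoA nests n c done).1 ++ (pvGoListA nests n cs' "" (pvGoA nests n c done).2).1 := by
          rw [pvGoListA, pvGoListA_frame]
          simp [String.empty_append]
        refine ⟨F₁ ++ F₂, ?_, ?_⟩
        · rw [pv_join_append, hj₁, hj₂, ht]
        · rw [List.map_cons, List.cons_append, hr₁, hr₂, hd, List.append_assoc]
    intro key done rest h
    by_cases hks : done.contains key = true
    · refine ⟨[], ?_, ?_⟩
      · simp [pv_join_nil, pvGoA, hks]
      · rw [pvRunB, if_pos hks]
        simp [pvGoA, hks]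
    · cases hget : nests.get? key with
      | none =>
        have hstep : pvRunB nests ((true, key) :: rest) [] done
            = pvRunB nests rest ([] ++ [key ++ ";\n"]) (done.insert key "") := by
          rw [pvRunB, if_neg hks, hget]
        refine ⟨[key ++ ";\n"], ?_, ?_⟩
        · rw [pv_join_cons, pv_join_nil]
          simp [pvGoA, hks, hget]
        · rw [hstep,
            show ([] : List String) ++ [key ++ ";\n"] = [key ++ ";\n"] ++ [] from by simp,
            pvRunB_frame nests rest [] (done.insert key "") [key ++ ";\n"]]
          simp [pvGoA, hks, hget]
      | some childs =>
        have hU1 : pvU nests (done.insert key "") < n :=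
          lt_of_lt_of_le
            (pvU_insert_nest nests done key "" childs hget (eq_false_of_ne_true hks))
            (Nat.lt_succ_iff.mp h)
        obtain ⟨F, hj, hr⟩ := ihL
          (PySem.List.sorted childs (fun x => if nests.contains x then (0 : Int) else 1) false)
          (done.insert key "") ((false, key) :: rest) hU1
        have hA0 : pvGoA nests (n + 1) key done
            = ((pvGoListA nests n
                  (PySem.List.sorted childs (fun x => if nests.contains x then (0 : Int) else 1) false)
                  ("\nsubgraph cluster_" ++ key ++ "{\n" ++ key ++ ";\n") (done.insert key "")).1 ++ "}\n",
               (pvGoListA nests n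
                  (PySem.List.sorted childs (fun x => if nests.contains x then (0 : Int) else 1) false)
                  ("\nsubgraph cluster_" ++ key ++ "{\n" ++ key ++ ";\n") (done.insert key "")).2) := by
          rw [pvGoA, if_neg hks, hget]
        have hA : pvGoA nests (n + 1) key done
            = (("\nsubgraph cluster_" ++ key ++ "{\n" ++ key ++ ";\n")
                 ++ (pvGoListA nests n
                      (PySem.List.sorted childs (fun x => if nests.contains x then (0 : Int) else 1) false)
                      "" (done.insert key "")).1 ++ "}\n",
               (pvGoListA nests n
                  (PySem.List.sorted childs (fun x => if nests.contains x then (0 : Int) else 1) false)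
                  "" (done.insert key "")).2) := by
          rw [hA0, pvGoListA_frame]
        have hclose : pvRunB nests ((false, key) :: rest) []
              (pvGoListA nests n
                 (PySem.List.sorted childs (fun x => if nests.contains x then (0 : Int) else 1) false)
                 "" (done.insert key "")).2
            = (["}\n"] ++ (pvRunB nests rest []
                 (pvGoListA nests n
                    (PySem.List.sorted childs (fun x => if nests.contains x then (0 : Int) else 1) false)
                    "" (done.insert key "")).2).1,
               (pvRunB nests rest []
                 (pvGoListA nests n
                    (PySem.List.sorted childs (fun x => if nests.contains x then (0 : Int) else 1) false)
                    "" (done.insert key "")).2).2) := by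
          rw [show pvRunB nests ((false, key) :: rest) []
                (pvGoListA nests n
                   (PySem.List.sorted childs (fun x => if nests.contains x then (0 : Int) else 1) false)
                   "" (done.insert key "")).2
              = pvRunB nests rest ([] ++ ["}\n"])
                (pvGoListA nests n
                   (PySem.List.sorted childs (fun x => if nests.contains x then (0 : Int) else 1) false)
                   "" (done.insert key "")).2 from by rw [pvRunB],
            show ([] : List String) ++ ["}\n"] = ["}\n"] ++ [] from by simp,
            pvRunB_frame]
        refine ⟨["\nsubgraph cluster_" ++ key ++ "{\n" ++ key ++ ";\n"] ++ F ++ ["}\n"], ?_, ?_⟩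
        · rw [pv_join_append, pv_join_append, pv_join_cons, pv_join_nil, pv_join_cons, pv_join_nil,
            hj, hA]
          simp [String.append_assoc]
        · have hstep : pvRunB nests ((true, key) :: rest) [] done
              = pvRunB nests
                  ((PySem.List.sorted childs (fun x => if nests.contains x then (0 : Int) else 1) false).map
                      (fun c => (true, c)) ++ (false, key) :: rest)
                  ([] ++ ["\nsubgraph cluster_" ++ key ++ "{\n" ++ key ++ ";\n"]) (done.insert key "") := by
            rw [pvRunB, if_neg hks, hget]
          rw [hstep,
            show ([] : List String) ++ ["\nsubgraph cluster_" ++ key ++ "{\n" ++ key ++ ";\n"]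
              = ["\nsubgraph cluster_" ++ key ++ "{\n" ++ key ++ ";\n"] ++ [] from by simp,
            pvRunB_frame, hr, hclose, hA]
          simp [List.append_assoc]

-- ===== VERDICT (by name: the statement is the Claim_ definition above) =====
theorem get_subgraph_text_spec : Claim_equal_get_subgraph_text := by
  intro key nests done _
  unfold Spec_get_subgraph_text get_subgraph_text get_subgraph_text_alt
  obtain ⟨F, hjoin, hrun⟩ := pvGoA_main (PySem.Dict.mk nests) ((PySem.Dict.mk nests).size + 1)
    key (PySem.Dict.mk done) []
    (Nat.lt_succ_of_le (pvU_le_size _ _))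
  rw [hrun]
  simp [pvRunB, hjoin]
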